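-- pv_equiv track=rewrite | github.com/pagand/Algorithms | tabu_search.py | costfun
-- ===== SOURCE A (Python) =====
-- def costfun(solution):
--     # [x1*x1 , x2*x1, x2*x2, x3*x1, x3*x2, x3*x3]
--     cost = 0
--     q = [-6, 5, -2, -5, 1, -4]
--     sol = [solution[0]*solution[0],solution[1]*solution[0], solution[1]*solution[1],
--             solution[2]*solution[0],solution[2]*solution[1], solution[2]*solution[2]]
--     for i in range(len(q)):
--         cost += sol[i]*q[i]
--     return cost
-- ===== SOURCE B (Python) =====
-- def costfun(solution):
--     # Closed-form, factored evaluation of the quadratic form: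
--     # -6*x1^2 + 5*x2*x1 - 2*x2^2 - 5*x3*x1 + x3*x2 - 4*x3^2
--     # grouped Horner-style by x1 and x3; no loops, no coefficient table.
--     x1 = solution[0]
--     x2 = solution[1]
--     x3 = solution[2]
--     return x1 * (5 * x2 - 6 * x1) + x3 * (x2 - 5 * x1 - 4 * x3) - 2 * x2 * x2
-- ===== Notes on version B (the rewrite author's own statement) =====
-- stated objective: simpler
-- what changed: Replaces A's precomputed products list, coefficient list and accumulation loop by a single closed-form Horner-factored arithmetic expression with no loops or tables.
import Mathlib
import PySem

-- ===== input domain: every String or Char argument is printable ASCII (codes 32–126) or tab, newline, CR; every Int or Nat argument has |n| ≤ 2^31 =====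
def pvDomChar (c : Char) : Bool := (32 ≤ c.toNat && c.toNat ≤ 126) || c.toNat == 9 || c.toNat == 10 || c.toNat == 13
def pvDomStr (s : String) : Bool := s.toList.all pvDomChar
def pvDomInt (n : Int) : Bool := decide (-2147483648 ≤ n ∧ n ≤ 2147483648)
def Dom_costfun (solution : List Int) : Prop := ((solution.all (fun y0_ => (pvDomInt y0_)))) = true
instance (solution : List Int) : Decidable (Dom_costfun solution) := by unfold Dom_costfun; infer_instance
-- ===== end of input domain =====

-- B evaluates the same quadratic form as one closed-form Horner-factored arithmetic
-- expression, with no loops and no coefficient/products lists (objective: simpler).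

-- ===== PORT A =====
-- indexing is exact on Pre_ (list has ≥ 3 elements); Python raises IndexError outside it
def costfun (solution : List Int) : Int :=
  let q : List Int := [-6, 5, -2, -5, 1, -4]
  let sol : List Int :=
    [PySem.List.pyGetD solution 0 0 * PySem.List.pyGetD solution 0 0,
     PySem.List.pyGetD solution 1 0 * PySem.List.pyGetD solution 0 0,
     PySem.List.pyGetD solution 1 0 * PySem.List.pyGetD solution 1 0,
     PySem.List.pyGetD solution 2 0 * PySem.List.pyGetD solution 0 0,
     PySem.List.pyGetD solution 2 0 * PySem.List.pyGetD solution 1 0,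
     PySem.List.pyGetD solution 2 0 * PySem.List.pyGetD solution 2 0]
  (PySem.List.pyRange 0 (q.length : Int) 1).foldl
    (fun cost i => cost + PySem.List.pyGetD sol i 0 * PySem.List.pyGetD q i 0) 0

-- ===== PORT B =====
def costfun_alt (solution : List Int) : Int :=
  let x1 := PySem.List.pyGetD solution 0 0
  let x2 := PySem.List.pyGetD solution 1 0
  let x3 := PySem.List.pyGetD solution 2 0
  x1 * (5 * x2 - 6 * x1) + x3 * (x2 - 5 * x1 - 4 * x3) - 2 * x2 * x2

-- ===== PRECONDITION & SPEC =====
-- Pre_ excludes lists with fewer than 3 elements, on which the Python A (and B) raise IndexError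
def Pre_costfun (solution : List Int) : Prop := 3 ≤ solution.length
instance (solution : List Int) : Decidable (Pre_costfun solution) := by unfold Pre_costfun; infer_instance
def pvWitness_costfun : List Int := ([1, 2, 3])
def Spec_costfun (solution : List Int) (out : Int) : Prop := out = costfun_alt solution
instance (solution : List Int) (out : Int) : Decidable (Spec_costfun solution out) := by unfold Spec_costfun; infer_instance

-- ===== CLAIM (what is proved, stated in full; the proofs are below) =====
def Claim_equal_costfun : Prop := ∀ (solution : List Int), Dom_costfun solution → Pre_costfun solution → Spec_costfun solution (costfun solution)

-- ===== LEMMAS AND PROOFS =====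

-- ===== VERDICT (by name: the statement is the Claim_ definition above) =====
theorem costfun_spec : Claim_equal_costfun := by
  intro solution _ hpre
  unfold Pre_costfun at hpre
  match solution, hpre with
  | a :: b :: c :: rest, _ =>
    show costfun _ = costfun_alt _
    have h6 : PySem.List.pyRange 0 (((6 : Nat) : Int)) 1 = [0, 1, 2, 3, 4, 5] := by decide
    have ga : PySem.List.pyGetD (a :: b :: c :: rest) 0 0 = a := by
      rw [PySem.List.pyGetD_eq_getElem _ _ (by omega) (by omega)]; simp
    have gb : PySem.List.pyGetD (a :: b :: c :: rest) 1 0 = b := by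
      rw [PySem.List.pyGetD_eq_getElem _ _ (by omega) (by omega)]; simp
    have gc : PySem.List.pyGetD (a :: b :: c :: rest) 2 0 = c := by
      rw [PySem.List.pyGetD_eq_getElem _ _ (by omega) (by omega)]; simp
    simp only [costfun, costfun_alt, List.length_cons, List.length_nil, h6, ga, gb, gc, List.foldl]
    simp [PySem.List.pyGetD, PySem.List.pyGet?, PySem.List.pyIdx?]
    ring
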